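-- pv_equiv track=rewrite | github.com/ShevchonokOlya/SoftUni_Advanced | advanced_tasks.py | matching_parentheses
-- ===== SOURCE A (Python) =====
-- def matching_parentheses(algebraic_expression: str) -> list:
--     stack = []
--     parentheses_indexes = []
--     for i in range(len(algebraic_expression)):
--         if algebraic_expression[i] == "(":
--             parentheses_indexes.append(i)
--         elif algebraic_expression[i] == ")":
--             if parentheses_indexes:
--                 start_index = parentheses_indexes.pop()
--                 close_index = i + 1
--                 phrase = algebraic_expression[start_index:close_index]
--                 stack.append(phrase)
--     return stack
-- ===== SOURCE B (Python) =====
-- def matching_parentheses(algebraic_expression: str) -> list: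
--     result = []
--     open_accs = []  # one in-progress character buffer per currently-open '('
--     for ch in algebraic_expression:
--         for acc in open_accs:
--             acc.append(ch)
--         if ch == "(":
--             open_accs.append([ch])
--         elif ch == ")":
--             if open_accs:
--                 result.append("".join(open_accs.pop()))
--     return result
-- ===== Notes on version B (the rewrite author's own statement) =====
-- stated objective: alternative
-- what changed: Instead of recording open-'(' indices and slicing the original string on each close, B keeps a stack of in-progress character buffers (one per open '('), appends each character to every open buffer, and emits a finished buffer when its ')' arrives.
import Mathlib
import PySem

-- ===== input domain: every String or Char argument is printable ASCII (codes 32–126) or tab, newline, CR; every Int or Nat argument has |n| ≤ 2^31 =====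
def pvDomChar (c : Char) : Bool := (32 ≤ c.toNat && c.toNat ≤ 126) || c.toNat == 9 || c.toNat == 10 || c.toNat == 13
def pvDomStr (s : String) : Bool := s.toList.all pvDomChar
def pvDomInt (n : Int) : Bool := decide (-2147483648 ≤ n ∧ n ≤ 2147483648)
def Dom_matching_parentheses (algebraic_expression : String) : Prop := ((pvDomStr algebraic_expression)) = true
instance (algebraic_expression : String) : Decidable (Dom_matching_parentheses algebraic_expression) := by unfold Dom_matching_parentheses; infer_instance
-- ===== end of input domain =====

-- B replaces A's record-indices-then-slice scheme by a stack of in-progress buffers, one per open '(' (alternative decomposition, same cost).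

-- ===== PORT A =====
-- step of A's for-loop; state = (stack, parentheses_indexes) with list head = Python stack top
def mpStepA (cs : List Char) (st : List String × List Int) (i : Int) : List String × List Int :=
  if PySem.List.pyGetD cs i ' ' = '(' then
    (st.1, i :: st.2)
  else if PySem.List.pyGetD cs i ' ' = ')' then
    match st.2 with
    | [] => st
    | start_index :: rest =>
      (st.1 ++ [String.ofList (PySem.List.slice cs (some start_index) (some (i + 1)))], rest)
  else st

def matching_parentheses (algebraic_expression : String) : List String :=
  let cs := algebraic_expression.toList
  ((PySem.List.pyRange 0 (cs.length : Int) 1).foldl (mpStepA cs) ([], [])).1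

-- ===== PORT B =====
-- step of B's for-loop; state = (result, open_accs) with list head = Python stack top
def mpStepB (st : List String × List (List Char)) (ch : Char) : List String × List (List Char) :=
  let accs := st.2.map (fun a => a ++ [ch])
  if ch = '(' then (st.1, ['('] :: accs)
  else if ch = ')' then
    match accs with
    | [] => (st.1, accs)
    | top :: rest => (st.1 ++ [String.ofList top], rest)
  else (st.1, accs)

def matching_parentheses_alt (algebraic_expression : String) : List String :=
  (algebraic_expression.toList.foldl mpStepB ([], [])).1

-- ===== PRECONDITION & SPEC =====
def Spec_matching_parentheses (algebraic_expression : String) (out : List String) : Prop := out = matching_parentheses_alt algebraic_expression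
instance (algebraic_expression : String) (out : List String) : Decidable (Spec_matching_parentheses algebraic_expression out) := by unfold Spec_matching_parentheses; infer_instance

-- ===== CLAIM (what is proved, stated in full; the proofs are below) =====
def Claim_equal_matching_parentheses : Prop := ∀ (algebraic_expression : String), Dom_matching_parentheses algebraic_expression → Spec_matching_parentheses algebraic_expression (matching_parentheses algebraic_expression)

-- ===== LEMMAS AND PROOFS =====

-- the invariant tying A's saved index to B's buffer after k characters
def mpRel (cs : List Char) (k : Nat) (i : Int) (a : List Char) : Prop :=
  ∃ m : Nat, i = (m : Int) ∧ m < k ∧ a = (cs.take k).drop m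

-- the joint state invariant
def mpInv (cs : List Char) (k : Nat) (sa : List String × List Int) (sb : List String × List (List Char)) : Prop :=
  sa.1 = sb.1 ∧ List.Forall₂ (mpRel cs k) sa.2 sb.2

lemma take_succ_drop {cs : List Char} {k m : Nat} (hk : k < cs.length) (hm : m ≤ k) :
    (cs.take (k + 1)).drop m = (cs.take k).drop m ++ [cs[k]] := by
  rw [List.take_add_one, List.getElem?_eq_getElem hk,
    List.drop_append_of_le_length (by simp; omega)]
  simp

lemma rel_bump {cs : List Char} {k : Nat} (hk : k < cs.length)
    {ia : List Int} {ba : List (List Char)} (h : List.Forall₂ (mpRel cs k) ia ba) :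
    List.Forall₂ (mpRel cs (k + 1)) ia (ba.map (fun a => a ++ [cs[k]])) := by
  rw [List.forall₂_map_right_iff]
  refine h.imp ?_
  rintro i a ⟨m, rfl, hm, rfl⟩
  exact ⟨m, rfl, Nat.lt_succ_of_lt hm, (take_succ_drop hk hm.le).symm⟩

lemma mpInv_step {cs : List Char} {k : Nat} {ra rb : List String}
    {ia : List Int} {ba : List (List Char)} (hk : k < cs.length)
    (h1 : ra = rb) (h2 : List.Forall₂ (mpRel cs k) ia ba) :
    mpInv cs (k + 1) (mpStepA cs (ra, ia) (k : Int)) (mpStepB (rb, ba) cs[k]) := by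
  have hget : PySem.List.pyGetD cs (k : Int) ' ' = cs[k] :=
    PySem.List.pyGetD_ofNat cs k ' ' hk
  unfold mpStepA mpStepB
  rw [hget]
  by_cases hp : cs[k] = '('
  · rw [if_pos hp, if_pos hp]
    refine ⟨h1, List.Forall₂.cons ⟨k, rfl, Nat.lt_succ_self k, ?_⟩ (rel_bump hk h2)⟩
    rw [take_succ_drop hk (Nat.le_refl k)]
    simp [hp]
  · by_cases hq : cs[k] = ')'
    · rw [if_neg hp, if_neg hp, if_pos hq, if_pos hq]
      cases h2 with
      | nil => exact ⟨h1, List.Forall₂.nil⟩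
      | @cons i b it bt hrel hrest =>
        obtain ⟨m, rfl, hm, rfl⟩ := hrel
        refine ⟨?_, rel_bump hk hrest⟩
        dsimp only [List.map]
        rw [h1]
        congr 2
        rw [← take_succ_drop hk hm.le,
          show ((k : Int) + 1) = ((m : Int) + ((k + 1 - m : Nat) : Int)) from by omega,
          PySem.List.slice_natCast_add, List.drop_take]
    · rw [if_neg hp, if_neg hp, if_neg hq, if_neg hq]
      exact ⟨h1, rel_bump hk h2⟩

lemma mp_loop_eq (cs : List Char) :
    ∀ (j : Nat) (sa : List String × List Int) (sb : List String × List (List Char)),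
      mpInv cs (cs.length - j) sa sb → j ≤ cs.length →
      ((PySem.List.pyRange ((cs.length - j : Nat) : Int) (cs.length : Int) 1).foldl (mpStepA cs) sa).1
        = ((cs.drop (cs.length - j)).foldl mpStepB sb).1 := by
  intro j
  induction j with
  | zero =>
    intro sa sb hinv _
    rw [PySem.List.pyRange_one_eq_nil (by simp)]
    simp [hinv.1]
  | succ j ih =>
    intro sa sb hinv hj
    set k := cs.length - (j + 1) with hkdef
    have hk : k < cs.length := by omega
    have hdrop : cs.drop k = cs[k] :: cs.drop (k + 1) := List.drop_eq_getElem_cons hk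
    rw [PySem.List.pyRange_one_cons (by exact_mod_cast hk), hdrop]
    simp only [List.foldl_cons]
    obtain ⟨ra, ia⟩ := sa
    obtain ⟨rb, ba⟩ := sb
    have hstep := mpInv_step hk hinv.1 hinv.2
    have hnext : cs.length - j = k + 1 := by omega
    have harg : ((k : Int) + 1) = ((cs.length - j : Nat) : Int) := by omega
    rw [harg]
    have hdrop2 : cs.drop (k + 1) = cs.drop (cs.length - j) := by rw [hnext]
    rw [hdrop2]
    exact ih _ _ (hnext ▸ hstep) (by omega)

-- ===== VERDICT (by name: the statement is the Claim_ definition above) =====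
theorem matching_parentheses_spec : Claim_equal_matching_parentheses := by
  intro s _
  unfold Spec_matching_parentheses matching_parentheses matching_parentheses_alt
  have h := mp_loop_eq s.toList s.toList.length ([], [])  ([], [])
    (by exact ⟨rfl, by simp⟩) (Nat.le_refl _)
  simpa using h
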